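-- pv_equiv track=rewrite | github.com/KaleBhaskaraSrinivas/owlcoder | Farthest_number.py | farNumber
-- ===== SOURCE A (Python) =====
-- def farNumber(N,Arr):
--     l=[]
--     for i in range(N):
--         pos=-1
--         for j in range(N-1,i,-1):
--            if Arr[j]<Arr[i]:
--                pos=j
--                break
--         l.append(pos)
--     return l
-- ===== SOURCE B (Python) =====
-- def farNumber(N, Arr):
--     n = N if N > 0 else 0
--     # suffix minima: suff[j] = min(Arr[j:n])
--     suff = [0] * n
--     for j in range(n - 1, -1, -1):
--         suff[j] = Arr[j] if j == n - 1 else min(Arr[j], suff[j + 1])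
--     res = []
--     for i in range(n):
--         x = Arr[i]
--         lo, hi, pos = i + 1, n - 1, -1
--         while lo <= hi:
--             mid = (lo + hi) // 2
--             if suff[mid] < x:
--                 pos = mid
--                 lo = mid + 1
--             else:
--                 hi = mid - 1
--         res.append(pos)
--     return res
-- ===== Notes on version B (the rewrite author's own statement) =====
-- stated objective: faster
-- what changed: Replaces A's per-index backward linear scan with a suffix-minimum array built once plus a binary search (on the monotone suffix minima) for the rightmost later index smaller than Arr[i].
-- outside the precondition, e.g. on farNumber(1, []): A returns [-1], B raises IndexError
import Mathlib
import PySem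

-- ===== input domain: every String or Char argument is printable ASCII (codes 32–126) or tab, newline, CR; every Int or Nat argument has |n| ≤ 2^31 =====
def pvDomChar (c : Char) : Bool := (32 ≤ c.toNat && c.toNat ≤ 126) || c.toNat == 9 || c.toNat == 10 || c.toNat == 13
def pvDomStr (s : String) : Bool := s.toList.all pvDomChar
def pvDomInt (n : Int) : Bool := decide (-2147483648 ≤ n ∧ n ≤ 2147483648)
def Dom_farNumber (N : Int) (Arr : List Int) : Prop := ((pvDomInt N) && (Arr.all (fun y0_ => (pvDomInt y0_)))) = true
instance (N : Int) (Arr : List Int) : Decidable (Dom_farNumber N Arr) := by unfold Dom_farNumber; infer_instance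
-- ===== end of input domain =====

-- B replaces A's per-index backward scan by a suffix-minimum array plus a binary search
-- for the rightmost later index whose suffix minimum is below Arr[i] (objective: faster).

-- ===== PORT A =====
-- inner loop 'for j in range(N-1, i, -1): if Arr[j] < Arr[i]: pos = j; break' as find-first
def farNumberInner (Arr : List Int) (x : Int) : List Int → Int
  | [] => -1
  | j :: rest => if PySem.List.pyGetD Arr j 0 < x then j else farNumberInner Arr x rest

def farNumber (N : Int) (Arr : List Int) : List Int :=
  (PySem.List.pyRange 0 N 1).foldl
    (fun l i =>
      l ++ [farNumberInner Arr (PySem.List.pyGetD Arr i 0) (PySem.List.pyRange (N - 1) i (-1))]) []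

-- ===== PORT B =====
-- suffix-minimum array of Source B, built back-to-front: suff[j] = min(Arr[j:n])
def altSuff : List Int → List Int
  | [] => []
  | a :: rest =>
    match altSuff rest with
    | [] => [a]
    | b :: t => min a b :: b :: t

-- the 'while lo <= hi' binary search of Source B (fuel bounds the shrinking interval)
def altSearch (suff : List Int) (x : Int) : Nat → Int → Int → Int → Int
  | 0, _, _, pos => pos
  | fuel + 1, lo, hi, pos =>
    if lo ≤ hi then
      let mid := PySem.Int.floordiv (lo + hi) 2
      if PySem.List.pyGetD suff mid 0 < x then altSearch suff x fuel (mid + 1) hi mid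
      else altSearch suff x fuel lo (mid - 1) pos
    else pos

def farNumber_alt (N : Int) (Arr : List Int) : List Int :=
  let n : Int := if N > 0 then N else 0
  let suff := altSuff (Arr.take n.toNat)
  (PySem.List.pyRange 0 n 1).foldl
    (fun res i =>
      res ++ [altSearch suff (PySem.List.pyGetD Arr i 0) (n - 1 - i).toNat (i + 1) (n - 1) (-1)]) []

-- ===== PRECONDITION & SPEC =====
-- Pre_ excludes N > len(Arr), where A's inner loop indexes past the list (IndexError) except in the
-- degenerate N = 1 case whose empty inner range lets A return [-1] lazily while B's eager
-- suffix-minimum pass over the N-prefix raises IndexError.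
def Pre_farNumber (N : Int) (Arr : List Int) : Prop := N ≤ Arr.length
instance (N : Int) (Arr : List Int) : Decidable (Pre_farNumber N Arr) := by
  unfold Pre_farNumber; infer_instance

def pvWitness_farNumber : Int × List Int := (5, [3, 1, 4, 1, 5])

def Spec_farNumber (N : Int) (Arr : List Int) (out : List Int) : Prop := out = farNumber_alt N Arr
instance (N : Int) (Arr : List Int) (out : List Int) : Decidable (Spec_farNumber N Arr out) := by
  unfold Spec_farNumber; infer_instance

-- ===== CLAIM (what is proved, stated in full; the proofs are below) =====
def Claim_equal_farNumber : Prop := ∀ (N : Int) (Arr : List Int), Dom_farNumber N Arr → Pre_farNumber N Arr → Spec_farNumber N Arr (farNumber N Arr)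

-- ===== LEMMAS AND PROOFS =====

-- the common characterisation: r is the rightmost index j with lo < j ≤ hi and P j, else -1
def FarSpec (P : Int → Prop) (lo hi r : Int) : Prop :=
  (r = -1 ∧ ∀ j, lo < j → j ≤ hi → ¬ P j) ∨
  (lo < r ∧ r ≤ hi ∧ P r ∧ ∀ j, r < j → j ≤ hi → ¬ P j)

theorem farSpec_unique {P : Int → Prop} {lo hi r1 r2 : Int}
    (h1 : FarSpec P lo hi r1) (h2 : FarSpec P lo hi r2) : r1 = r2 := by
  rcases h1 with ⟨e1, n1⟩ | ⟨l1, u1, p1, n1⟩ <;> rcases h2 with ⟨e2, n2⟩ | ⟨l2, u2, p2, n2⟩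
  · omega
  · exact absurd p2 (n1 _ l2 u2)
  · exact absurd p1 (n2 _ l1 u1)
  · by_contra hne
    rcases lt_or_gt_of_ne hne with h | h
    · exact n1 _ h u2 p2
    · exact n2 _ h u1 p1

-- A's inner loop satisfies the characterisation
theorem inner_farSpec_aux (Arr : List Int) (x i : Int) :
    ∀ (n : Nat) (a : Int), (a - i).toNat ≤ n →
    FarSpec (fun j => PySem.List.pyGetD Arr j 0 < x) i a
      (farNumberInner Arr x (PySem.List.pyRange a i (-1))) := by
  intro n
  induction n with
  | zero =>
    intro a h
    have ha : a ≤ i := by omega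
    rw [PySem.List.pyRange_neg_one_eq_nil ha]
    exact Or.inl ⟨rfl, fun j h1 h2 _ => by omega⟩
  | succ n ih =>
    intro a h
    by_cases hai : a ≤ i
    · rw [PySem.List.pyRange_neg_one_eq_nil hai]
      exact Or.inl ⟨rfl, fun j h1 h2 _ => by omega⟩
    · replace hai : i < a := by omega
      rw [PySem.List.pyRange_neg_one_cons hai]
      by_cases hax : PySem.List.pyGetD Arr a 0 < x
      · simp only [farNumberInner, if_pos hax]
        exact Or.inr ⟨hai, le_refl a, hax, fun j h1 h2 _ => by omega⟩
      · simp only [farNumberInner, if_neg hax]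
        rcases ih (a - 1) (by omega) with ⟨e, hn⟩ | ⟨l, u, p, hn⟩
        · exact Or.inl ⟨e, fun j h1 h2 pj =>
            if hja : j = a then hax (hja ▸ pj) else hn j h1 (by omega) pj⟩
        · exact Or.inr ⟨l, by omega, p, fun j h1 h2 pj =>
            if hja : j = a then hax (hja ▸ pj) else hn j h1 (by omega) pj⟩

theorem inner_farSpec (Arr : List Int) (x : Int) (a i : Int) :
    FarSpec (fun j => PySem.List.pyGetD Arr j 0 < x) i a
      (farNumberInner Arr x (PySem.List.pyRange a i (-1))) :=
  inner_farSpec_aux Arr x i (a - i).toNat a le_rfl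

theorem altSuff_cons (a : Int) (rest : List Int) :
    altSuff (a :: rest) =
      (match altSuff rest with | [] => a | b :: _ => min a b) :: altSuff rest := by
  cases h : altSuff rest <;> simp [altSuff, h]

theorem altSuff_length (xs : List Int) : (altSuff xs).length = xs.length := by
  induction xs with
  | nil => rfl
  | cons a rest ih => rw [altSuff_cons]; simp [ih]

-- suffix-minimum characterisation: suff[j] < x iff some element at index ≥ j is < x
theorem altSuff_lt_iff (xs : List Int) (x : Int) :
    ∀ (j : Nat), j < xs.length →
    (((altSuff xs).getD j 0 < x) ↔ ∃ k, j ≤ k ∧ k < xs.length ∧ xs.getD k 0 < x) := by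
  induction xs with
  | nil => intro j hj; simp at hj
  | cons a rest ih =>
    intro j hj
    rw [altSuff_cons]
    cases j with
    | zero =>
      cases hrest : altSuff rest with
      | nil =>
        have : rest = [] := by
          have := altSuff_length rest; rw [hrest] at this
          exact List.eq_nil_of_length_eq_zero this.symm
        subst this
        simp
      | cons b t =>
        have hlen : 0 < rest.length := by
          have := altSuff_length rest; rw [hrest] at this; simp at this; omega
        have hb : b = (altSuff rest).getD 0 0 := by rw [hrest]; rfl
        have ihr := ih 0 hlen
        rw [← hb] at ihr
        simp only [List.getD_cons_zero]
        constructor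
        · intro hmin
          rcases min_lt_iff.mp hmin with h | h
          · exact ⟨0, le_rfl, by simp, by simpa using h⟩
          · rcases ihr.mp h with ⟨k, h1, h2, h3⟩
            exact ⟨k + 1, by omega, by simp; omega, by simpa using h3⟩
        · rintro ⟨k, h1, h2, h3⟩
          apply min_lt_iff.mpr
          cases k with
          | zero => exact Or.inl (by simpa using h3)
          | succ k' =>
            exact Or.inr (ihr.mpr ⟨k', by omega, by simp at h2; omega, by simpa using h3⟩)
    | succ j' =>
      simp only [List.getD_cons_succ]
      have hj' : j' < rest.length := by simp at hj; omega
      rw [ih j' hj']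
      constructor
      · rintro ⟨k, h1, h2, h3⟩
        exact ⟨k + 1, by omega, by simp; omega, by simpa using h3⟩
      · rintro ⟨k, h1, h2, h3⟩
        cases k with
        | zero => omega
        | succ k' => exact ⟨k', by omega, by simp at h2; omega, by simpa using h3⟩

-- finishing the search: once the interval is empty, pos is the rightmost hit
theorem farSpec_of_done (P : Int → Prop) (lo0 hi0 lo hi pos : Int)
    (hdone : hi < lo)
    (hinv : (pos = -1 ∧ ∀ j, lo0 < j → j < lo → ¬ P j) ∨
        (lo0 < pos ∧ pos < lo ∧ pos ≤ hi0 ∧ P pos ∧ ∀ j, pos < j → j < lo → ¬ P j))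
    (hright : ∀ j, hi < j → j ≤ hi0 → ¬ P j) :
    FarSpec P lo0 hi0 pos := by
  rcases hinv with ⟨e, hn⟩ | ⟨l, u, uh, p, hn⟩
  · refine Or.inl ⟨e, fun j h1 h2 pj => ?_⟩
    by_cases hjc : j < lo
    · exact hn j h1 hjc pj
    · exact hright j (by omega) h2 pj
  · refine Or.inr ⟨l, uh, p, fun j h1 h2 pj => ?_⟩
    by_cases hjc : j < lo
    · exact hn j h1 hjc pj
    · exact hright j (by omega) h2 pj

-- binary-search correctness over a downward-closed predicate
theorem altSearch_farSpec (suff : List Int) (x lo0 hi0 : Int)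
    (P : Int → Prop) (hP : ∀ j, lo0 < j → j ≤ hi0 → (P j ↔ PySem.List.pyGetD suff j 0 < x))
    (Pdc : ∀ j k, lo0 < j → j ≤ k → k ≤ hi0 → P k → P j) :
    ∀ (fuel : Nat) (lo hi pos : Int), (hi - lo + 1).toNat ≤ fuel →
      lo0 < lo → hi ≤ hi0 →
      ((pos = -1 ∧ ∀ j, lo0 < j → j < lo → ¬ P j) ∨
        (lo0 < pos ∧ pos < lo ∧ pos ≤ hi0 ∧ P pos ∧ ∀ j, pos < j → j < lo → ¬ P j)) →
      (∀ j, hi < j → j ≤ hi0 → ¬ P j) →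
      FarSpec P lo0 hi0 (altSearch suff x fuel lo hi pos) := by
  intro fuel
  induction fuel with
  | zero =>
    intro lo hi pos hfuel hlo hhi hinv hright
    exact farSpec_of_done P lo0 hi0 lo hi pos (by omega) hinv hright
  | succ fuel ih =>
    intro lo hi pos hfuel hlo hhi hinv hright
    by_cases hlh : lo ≤ hi
    · have hmid := PySem.Int.floordiv_two_mid_bounds hlh
      simp only [altSearch, if_pos hlh]
      by_cases hx : PySem.List.pyGetD suff (PySem.Int.floordiv (lo + hi) 2) 0 < x
      · rw [if_pos hx]
        refine ih (PySem.Int.floordiv (lo + hi) 2 + 1) hi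
          (PySem.Int.floordiv (lo + hi) 2) (by omega) (by omega) hhi ?_ hright
        exact Or.inr ⟨by omega, by omega, by omega,
          (hP _ (by omega) (by omega)).mpr hx, fun j h1 h2 _ => by omega⟩
      · rw [if_neg hx]
        have hnP : ∀ j, PySem.Int.floordiv (lo + hi) 2 ≤ j → j ≤ hi0 → ¬ P j := by
          intro j h1 h2 pj
          exact hx ((hP _ (by omega) (by omega)).mp
            (Pdc (PySem.Int.floordiv (lo + hi) 2) j (by omega) h1 h2 pj))
        refine ih lo (PySem.Int.floordiv (lo + hi) 2 - 1) pos (by omega) hlo (by omega) hinv ?_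
        intro j h1 h2
        exact hnP j (by omega) h2
    · simp only [altSearch, if_neg hlh]
      exact farSpec_of_done P lo0 hi0 lo hi pos (by omega) hinv hright

-- rightmost index with 'some later element < x' is the rightmost index with 'element < x'
theorem farSpec_transfer (Ps Pg : Int → Prop) (lo hi r : Int)
    (hchar : ∀ j, lo < j → j ≤ hi → (Ps j ↔ ∃ k, j ≤ k ∧ k ≤ hi ∧ Pg k))
    (h : FarSpec Ps lo hi r) : FarSpec Pg lo hi r := by
  rcases h with ⟨e, hn⟩ | ⟨l, u, p, hn⟩
  · exact Or.inl ⟨e, fun j h1 h2 pj => hn j h1 h2 ((hchar j h1 h2).mpr ⟨j, le_rfl, h2, pj⟩)⟩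
  · refine Or.inr ⟨l, u, ?_, fun j h1 h2 pj => hn j h1 h2 ((hchar j (by omega) h2).mpr ⟨j, le_rfl, h2, pj⟩)⟩
    rcases (hchar r l u).mp p with ⟨k, hk1, hk2, hk3⟩
    rcases eq_or_lt_of_le hk1 with rfl | hk
    · exact hk3
    · exact absurd ((hchar k (by omega) hk2).mpr ⟨k, le_rfl, hk2, hk3⟩) (hn k hk hk2)

-- suffix characterisation lifted to Int indices of the n-prefix
theorem suff_char (Arr : List Int) (N x : Int) (hN : 0 < N) (hlen : N ≤ Arr.length) :
    ∀ j : Int, 0 ≤ j → j ≤ N - 1 →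
    (PySem.List.pyGetD (altSuff (Arr.take N.toNat)) j 0 < x ↔
      ∃ k : Int, j ≤ k ∧ k ≤ N - 1 ∧ PySem.List.pyGetD Arr k 0 < x) := by
  intro j hj0 hjN
  have hxs : (Arr.take N.toNat).length = N.toNat := by simp; omega
  have hjlt : j.toNat < (Arr.take N.toNat).length := by rw [hxs]; omega
  have hget : ∀ k : Nat, k < N.toNat → (Arr.take N.toNat).getD k 0 = Arr.getD k 0 := by
    intro k hk
    rw [List.getD_eq_getElem _ _ (by rw [hxs]; omega), List.getD_eq_getElem _ _ (by omega)]
    simp [List.getElem_take]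
  rw [PySem.List.pyGetD_of_nonneg _ _ hj0, altSuff_lt_iff _ x j.toNat hjlt]
  constructor
  · rintro ⟨k, h1, h2, h3⟩
    rw [hxs] at h2
    rw [hget k h2] at h3
    refine ⟨(k : Int), by omega, by omega, ?_⟩
    rw [PySem.List.pyGetD_of_nonneg _ _ (by omega : (0:Int) ≤ (k:Int))]
    simpa using h3
  · rintro ⟨k, h1, h2, h3⟩
    refine ⟨k.toNat, by omega, by rw [hxs]; omega, ?_⟩
    rw [hget k.toNat (by omega)]
    rw [PySem.List.pyGetD_of_nonneg _ _ (by omega : (0:Int) ≤ k)] at h3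
    exact h3

-- ===== VERDICT (by name: the statement is the Claim_ definition above) =====
theorem farNumber_spec : Claim_equal_farNumber := by
  intro N Arr _ hpre
  unfold Pre_farNumber at hpre
  unfold Spec_farNumber farNumber farNumber_alt
  by_cases hN : N > 0
  · simp only [if_pos hN]
    rw [PySem.List.foldl_append_singleton_eq_map, PySem.List.foldl_append_singleton_eq_map]
    apply List.map_congr_left
    intro i hi
    rw [PySem.List.mem_pyRange_one] at hi
    obtain ⟨hi0, hiN⟩ := hi
    set x := PySem.List.pyGetD Arr i 0 with hx
    have h1 := inner_farSpec Arr x (N - 1) i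
    have hchar : ∀ j, i < j → j ≤ N - 1 →
        ((fun j => PySem.List.pyGetD (altSuff (Arr.take N.toNat)) j 0 < x) j ↔
          ∃ k, j ≤ k ∧ k ≤ N - 1 ∧ (fun k => PySem.List.pyGetD Arr k 0 < x) k) := by
      intro j hj1 hj2
      exact suff_char Arr N x hN hpre j (by omega) hj2
    have h2 := altSearch_farSpec (altSuff (Arr.take N.toNat)) x i (N - 1)
      (fun j => PySem.List.pyGetD (altSuff (Arr.take N.toNat)) j 0 < x)
      (fun j _ _ => Iff.rfl)
      (by
        intro j k hj hk1 hk2 pk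
        rcases (hchar k (by omega) hk2).mp pk with ⟨m, hm1, hm2, hm3⟩
        exact (hchar j hj (by omega)).mpr ⟨m, by omega, hm2, hm3⟩)
      (N - 1 - i).toNat (i + 1) (N - 1) (-1)
      (by omega) (by omega) le_rfl
      (Or.inl ⟨rfl, fun j h1 h2 _ => by omega⟩)
      (fun j h1 h2 _ => by omega)
    have h2' := farSpec_transfer _ _ i (N - 1) _ hchar h2
    exact farSpec_unique h1 h2'
  · simp only [if_neg hN]
    rw [PySem.List.pyRange_one_eq_nil (by omega : N ≤ 0),
      PySem.List.pyRange_one_eq_nil (by omega : (0:Int) ≤ 0)]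
    rfl
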